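-- pv_equiv track=rewrite | github.com/RegCoDev/stromalytix | archive/v0.1.0-pre-pivot/core/bio_process_miner.py | _find_xor_cut
-- ===== SOURCE A (Python) =====
-- from collections import defaultdict, Counter
--
-- def _find_xor_cut(traces, activities):
--     """Check if activities partition into mutually exclusive groups."""
--     co_occurrence = defaultdict(set)
--     for trace in traces:
--         trace_acts = set(trace)
--         for a in trace_acts:
--             co_occurrence[a].update(trace_acts)
--
--     # Find connected components
--     visited = set()
--     components = []
--     for a in activities:
--         if a not in visited:
--             component = set()
--             stack = [a]
--             while stack:
--                 node = stack.pop()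
--                 if node in visited:
--                     continue
--                 visited.add(node)
--                 component.add(node)
--                 for neighbor in co_occurrence.get(node, set()):
--                     if neighbor in set(activities) and neighbor not in visited:
--                         stack.append(neighbor)
--             components.append(sorted(component))
--
--     if len(components) > 1:
--         return components
--     return None
-- ===== SOURCE B (Python) =====
-- def _find_xor_cut(traces, activities):
--     """Check if activities partition into mutually exclusive groups."""
--     # Partition refinement by trace folding: start with one singleton block per
--     # distinct activity (in first-appearance order), then for each trace merge
--     # every block it touches into the position of the earliest touched block.
--     acts = set(activities)
--     blocks = []
--     seen = set()
--     for a in activities: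
--         if a not in seen:
--             seen.add(a)
--             blocks.append({a})
--     for trace in traces:
--         t = set(trace) & acts
--         union = set()
--         for b in blocks:
--             if b & t:
--                 union |= b
--         new_blocks = []
--         placed = False
--         for b in blocks:
--             if b & t:
--                 if not placed:
--                     new_blocks.append(union)
--                     placed = True
--             else:
--                 new_blocks.append(b)
--         blocks = new_blocks
--     comps = [sorted(b) for b in blocks]
--     if len(comps) > 1:
--         return comps
--     return None
-- ===== Notes on version B (the rewrite author's own statement) =====
-- stated objective: faster
-- what changed: Replaces A's dense co-occurrence adjacency dict plus stack-based DFS (which rebuilds set(activities) inside its innermost neighbor loop) with a partition-refinement fold: start from singleton blocks per distinct activity and, for each trace, merge every block the trace touches into the earliest touched block.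
import Mathlib
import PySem

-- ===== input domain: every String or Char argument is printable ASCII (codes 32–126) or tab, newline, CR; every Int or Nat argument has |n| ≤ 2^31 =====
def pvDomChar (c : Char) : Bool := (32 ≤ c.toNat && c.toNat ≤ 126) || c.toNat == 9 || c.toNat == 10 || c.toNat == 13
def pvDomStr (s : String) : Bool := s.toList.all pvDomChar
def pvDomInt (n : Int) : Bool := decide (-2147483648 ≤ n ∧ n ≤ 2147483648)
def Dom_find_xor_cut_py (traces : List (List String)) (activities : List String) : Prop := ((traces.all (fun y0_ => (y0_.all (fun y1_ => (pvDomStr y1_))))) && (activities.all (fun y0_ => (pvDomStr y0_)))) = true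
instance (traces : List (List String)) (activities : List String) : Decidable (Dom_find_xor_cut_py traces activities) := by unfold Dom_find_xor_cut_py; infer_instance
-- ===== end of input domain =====

-- B replaces A's co-occurrence-graph DFS by a partition-refinement fold over the traces (alternative algorithm, similar cost).
-- ===== PORT A =====
def pvCoocc (traces : List (List String)) : PySem.Dict String (PySem.Set String) :=
  traces.foldl (fun d trace =>
    let traceActs : PySem.Set String := PySem.Set.ofList trace
    traceActs.foldl (fun d a => d.insert a (PySem.Set.update (d.getD a []) traceActs)) d)
    PySem.Dict.empty

theorem pvFilterLt (p q : String → Bool) (hm : ∀ x, q x = true → p x = true) :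
    ∀ (l : List String) (a : String), a ∈ l → q a = false → p a = true →
    (l.filter q).length < (l.filter p).length := by
  intro l
  induction l with
  | nil => intro a ha _ _; cases ha
  | cons h t ih =>
    intro a ha hq hp
    have hle : (t.filter q).length ≤ (t.filter p).length :=
      List.Sublist.length_le (List.monotone_filter_right t hm)
    simp only [List.filter_cons]
    rcases List.mem_cons.mp ha with rfl | hat
    · rw [hq, hp]; simp; omega
    · have hlt := ih a hat hq hp
      cases hqh : q h
      · cases hph : p h
        · simp; omega
        · simp; omega
      · rw [hm h hqh]; simp; omega

theorem pvUnvisitedDecr (l : List String) (visited : PySem.Set String) (a : String)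
    (ha : a ∈ l) (hnv : ¬ (PySem.Set.contains visited a = true)) :
    ((l.filter (fun x => !(PySem.Set.contains (PySem.Set.add visited a) x))).length
      < (l.filter (fun x => !(PySem.Set.contains visited x))).length) := by
  apply pvFilterLt _ _ _ l a ha
  · simp only [Bool.not_eq_false']
    exact (PySem.Set.contains_iff _ _).mpr ((PySem.Set.mem_add _ _ _).mpr (Or.inr rfl))
  · simpa using hnv
  · intro x hx
    simp only [Bool.not_eq_true'] at hx ⊢
    cases hcx : PySem.Set.contains visited x
    · rfl
    · exfalso
      have := (PySem.Set.mem_add visited a x).mpr (Or.inl ((PySem.Set.contains_iff _ _).mp hcx))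
      rw [(PySem.Set.contains_iff _ _).mpr this] at hx
      cases hx

def pvDfs (cooc : PySem.Dict String (PySem.Set String)) (activities : List String)
    (visited component : PySem.Set String) (stack : List {x : String // x ∈ activities}) :
    PySem.Set String × PySem.Set String :=
  match stack with
  | [] => (visited, component)
  | node :: rest =>
    if PySem.Set.contains visited node.val then
      pvDfs cooc activities visited component rest
    else
      let visited' := PySem.Set.add visited node.val
      let component' := PySem.Set.add component node.val
      let nbrs := (cooc.getD node.val []).filter
        (fun nb => PySem.Set.contains (PySem.Set.ofList activities) nb
                    && !(PySem.Set.contains visited' nb))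
      let pushes : List {x : String // x ∈ activities} :=
        nbrs.pmap (fun nb h => ⟨nb, h⟩)
          (fun nb hnb => by
            have hf := (List.mem_filter.mp hnb).2
            have h1 := ((Bool.and_eq_true _ _).mp hf).1
            exact (PySem.Set.mem_ofList _ _).mp ((PySem.Set.contains_iff _ _).mp h1))
      pvDfs cooc activities visited' component' (pushes.reverse ++ rest)
termination_by
  (((PySem.List.dedup activities).filter (fun x => !(PySem.Set.contains visited x))).length,
    stack.length)
decreasing_by
  · apply Prod.Lex.right; simp
  · apply Prod.Lex.left
    apply pvUnvisitedDecr
    · exact (PySem.List.mem_dedup _ _).mpr node.property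
    · assumption

def find_xor_cut_py (traces : List (List String)) (activities : List String) :
    Option (List (List String)) :=
  let cooc := pvCoocc traces
  let st := activities.attach.foldl
    (fun (st : PySem.Set String × List (List String)) a =>
      if PySem.Set.contains st.1 a.val then st
      else
        let r := pvDfs cooc activities st.1 [] [a]
        (r.1, st.2 ++ [PySem.List.sorted r.2 (fun x => x) false]))
    ([], [])
  if st.2.length > 1 then some st.2 else none

-- ===== PORT B =====
def find_xor_cut_py_alt (traces : List (List String)) (activities : List String) :
    Option (List (List String)) :=
  let acts : PySem.Set String := PySem.Set.ofList activities
  let seed := activities.foldl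
    (fun (st : PySem.Set String × List (PySem.Set String)) a =>
      if PySem.Set.contains st.1 a then st
      else (PySem.Set.add st.1 a, st.2 ++ [[a]]))
    ([], [])
  let blocks := traces.foldl
    (fun (blocks : List (PySem.Set String)) trace =>
      let t := PySem.Set.inter (PySem.Set.ofList trace) acts
      let union := blocks.foldl
        (fun (u : PySem.Set String) b =>
          if !(PySem.Set.isdisjoint b t) then PySem.Set.update u b else u) []
      let st := blocks.foldl
        (fun (st : List (PySem.Set String) × Bool) b =>
          if !(PySem.Set.isdisjoint b t) then
            (if st.2 then st else (st.1 ++ [union], true))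
          else (st.1 ++ [b], st.2))
        ([], false)
      st.1)
    seed.2
  let comps := blocks.map (fun b => PySem.List.sorted b (fun x => x) false)
  if comps.length > 1 then some comps else none

-- ===== PRECONDITION & SPEC =====
def Spec_find_xor_cut_py (traces : List (List String)) (activities : List String) (out : Option (List (List String))) : Prop := out = find_xor_cut_py_alt traces activities
instance (traces : List (List String)) (activities : List String) (out : Option (List (List String))) : Decidable (Spec_find_xor_cut_py traces activities out) := by unfold Spec_find_xor_cut_py; infer_instance

-- ===== CLAIM (what is proved, stated in full; the proofs are below) =====
def Claim_equal_find_xor_cut_py : Prop := ∀ (traces : List (List String)) (activities : List String), Dom_find_xor_cut_py traces activities → Spec_find_xor_cut_py traces activities (find_xor_cut_py traces activities)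

-- ===== LEMMAS AND PROOFS =====
-- ===== relations =====
def pvEdge (traces : List (List String)) (activities : List String) (x y : String) : Prop :=
  x ∈ activities ∧ y ∈ activities ∧ ∃ t ∈ traces, x ∈ t ∧ y ∈ t

def pvConn (traces : List (List String)) (activities : List String) (x y : String) : Prop :=
  Relation.ReflTransGen (pvEdge traces activities) x y

theorem pvEdge_symm {traces : List (List String)} {activities : List String} {x y : String}
    (h : pvEdge traces activities x y) : pvEdge traces activities y x := by
  obtain ⟨hx, hy, t, ht, hxt, hyt⟩ := h
  exact ⟨hy, hx, t, ht, hyt, hxt⟩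

theorem pvConn_symm {traces : List (List String)} {activities : List String} {x y : String}
    (h : pvConn traces activities x y) : pvConn traces activities y x :=
  Relation.ReflTransGen.symmetric (fun _ _ h => pvEdge_symm h) h

theorem pvConn_nil {activities : List String} {x y : String} :
    pvConn [] activities x y ↔ x = y := by
  constructor
  · intro h
    induction h with
    | refl => rfl
    | tail _ e _ => exact absurd e.2.2 (by simp)
  · rintro rfl; exact Relation.ReflTransGen.refl

theorem pvEdge_snoc {ts : List (List String)} {tr : List String} {activities : List String}
    {x y : String} :
    pvEdge (ts ++ [tr]) activities x y ↔
      pvEdge ts activities x y ∨ (x ∈ activities ∧ y ∈ activities ∧ x ∈ tr ∧ y ∈ tr) := by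
  constructor
  · rintro ⟨hx, hy, t, ht, hxt, hyt⟩
    rcases List.mem_append.mp ht with h | h
    · exact Or.inl ⟨hx, hy, t, h, hxt, hyt⟩
    · simp only [List.mem_singleton] at h
      subst h
      exact Or.inr ⟨hx, hy, hxt, hyt⟩
  · rintro (⟨hx, hy, t, ht, hxt, hyt⟩ | ⟨hx, hy, hxt, hyt⟩)
    · exact ⟨hx, hy, t, List.mem_append.mpr (Or.inl ht), hxt, hyt⟩
    · exact ⟨hx, hy, tr, List.mem_append.mpr (Or.inr (by simp)), hxt, hyt⟩

theorem pvConn_mono_snoc {ts : List (List String)} {tr : List String} {activities : List String}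
    {x y : String} (h : pvConn ts activities x y) : pvConn (ts ++ [tr]) activities x y :=
  Relation.ReflTransGen.mono (fun _ _ e => pvEdge_snoc.mpr (Or.inl e)) h

theorem pvConn_snoc {ts : List (List String)} {tr : List String} {activities : List String}
    {x y : String} :
    pvConn (ts ++ [tr]) activities x y ↔
      pvConn ts activities x y ∨
        ∃ u v, pvConn ts activities x u ∧ u ∈ activities ∧ u ∈ tr ∧
               v ∈ activities ∧ v ∈ tr ∧ pvConn ts activities v y := by
  constructor
  · intro h
    induction h with
    | refl => exact Or.inl Relation.ReflTransGen.refl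
    | tail _ e ih =>
      rename_i b c _
      rcases pvEdge_snoc.mp e with e' | ⟨hb, hc, hbt, hct⟩
      · rcases ih with h1 | ⟨u, v, h1, hu, hut, hv, hvt, h2⟩
        · exact Or.inl (h1.tail e')
        · exact Or.inr ⟨u, v, h1, hu, hut, hv, hvt, h2.tail e'⟩
      · rcases ih with h1 | ⟨u, v, h1, hu, hut, hv, hvt, h2⟩
        · exact Or.inr ⟨b, c, h1, hb, hbt, hc, hct, Relation.ReflTransGen.refl⟩
        · exact Or.inr ⟨u, c, h1, hu, hut, hc, hct, Relation.ReflTransGen.refl⟩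
  · rintro (h | ⟨u, v, h1, hu, hut, hv, hvt, h2⟩)
    · exact pvConn_mono_snoc h
    · have he : pvEdge (ts ++ [tr]) activities u v := pvEdge_snoc.mpr (Or.inr ⟨hu, hv, hut, hvt⟩)
      exact ((pvConn_mono_snoc h1).tail he).trans (pvConn_mono_snoc h2)

-- ===== co-occurrence characterization =====
theorem pvCoocc_inner (S : PySem.Set String) :
    ∀ (l : List String) (d : PySem.Dict String (PySem.Set String)) (x y : String),
    (y ∈ (l.foldl (fun d a => d.insert a (PySem.Set.update (d.getD a []) S)) d).getD x [] ↔
      y ∈ d.getD x [] ∨ (x ∈ l ∧ y ∈ S)) := by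
  intro l
  induction l with
  | nil => intro d x y; simp
  | cons a l ih =>
    intro d x y
    simp only [List.foldl_cons]
    rw [ih]
    rw [PySem.Dict.getD_insert]
    by_cases hxa : x = a
    · subst hxa
      simp only [if_true]
      rw [PySem.Set.mem_update]
      constructor
      · rintro (( h | h) | ⟨_, h⟩)
        · exact Or.inl h
        · exact Or.inr ⟨by simp, h⟩
        · exact Or.inr ⟨by simp, h⟩
      · rintro (h | ⟨_, h⟩)
        · exact Or.inl (Or.inl h)
        · exact Or.inl (Or.inr h)
    · simp only [if_neg hxa]
      constructor
      · rintro (h | ⟨hl, h⟩)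
        · exact Or.inl h
        · exact Or.inr ⟨List.mem_cons_of_mem _ hl, h⟩
      · rintro (h | ⟨hl, h⟩)
        · exact Or.inl h
        · rcases List.mem_cons.mp hl with rfl | hl
          · exact absurd rfl hxa
          · exact Or.inr ⟨hl, h⟩

theorem pvCoocc_mem (traces : List (List String)) (x y : String) :
    y ∈ (pvCoocc traces).getD x [] ↔ ∃ t ∈ traces, x ∈ t ∧ y ∈ t := by
  suffices h : ∀ (ts : List (List String)) (d : PySem.Dict String (PySem.Set String)) (x y : String),
      (y ∈ (ts.foldl (fun d trace =>
        (PySem.Set.ofList trace).foldl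
          (fun d a => d.insert a (PySem.Set.update (d.getD a []) (PySem.Set.ofList trace))) d) d).getD x [] ↔
        y ∈ d.getD x [] ∨ ∃ t ∈ ts, x ∈ t ∧ y ∈ t) by
    have := h traces PySem.Dict.empty x y
    simpa [pvCoocc] using this
  intro ts
  induction ts with
  | nil => intro d x y; simp
  | cons tr ts ih =>
    intro d x y
    simp only [List.foldl_cons]
    rw [ih]
    rw [pvCoocc_inner]
    simp only [PySem.Set.mem_ofList]
    constructor
    · rintro ((h | ⟨h1, h2⟩) | ⟨t, ht, h1, h2⟩)
      · exact Or.inl h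
      · exact Or.inr ⟨tr, by simp, h1, h2⟩
      · exact Or.inr ⟨t, List.mem_cons_of_mem _ ht, h1, h2⟩
    · rintro (h | ⟨t, ht, h1, h2⟩)
      · exact Or.inl (Or.inl h)
      · rcases List.mem_cons.mp ht with rfl | ht
        · exact Or.inl (Or.inr ⟨h1, h2⟩)
        · exact Or.inr ⟨t, ht, h1, h2⟩

-- ===== DFS correctness =====
theorem pvDfs_invariant (traces : List (List String)) (activities : List String)
    (visited₀ : PySem.Set String) (a : String) :
    ∀ (visited component : PySem.Set String) (stack : List {x : String // x ∈ activities}),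
    (∀ y, y ∈ visited ↔ y ∈ visited₀ ∨ y ∈ component) →
    (∀ y ∈ component, pvConn traces activities a y) →
    (∀ s ∈ stack, pvConn traces activities a s.val) →
    (∀ y ∈ component, ∀ z, pvEdge traces activities y z →
        z ∈ visited ∨ ∃ s ∈ stack, s.val = z) →
    component.Nodup →
    ((∀ y, y ∈ (pvDfs (pvCoocc traces) activities visited component stack).1 ↔
        y ∈ visited₀ ∨ y ∈ (pvDfs (pvCoocc traces) activities visited component stack).2) ∧
     (∀ y ∈ (pvDfs (pvCoocc traces) activities visited component stack).2,
        pvConn traces activities a y) ∧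
     (∀ y ∈ component, y ∈ (pvDfs (pvCoocc traces) activities visited component stack).2) ∧
     (∀ s ∈ stack, s.val ∈ (pvDfs (pvCoocc traces) activities visited component stack).1) ∧
     (∀ y ∈ (pvDfs (pvCoocc traces) activities visited component stack).2,
        ∀ z, pvEdge traces activities y z →
          z ∈ (pvDfs (pvCoocc traces) activities visited component stack).1) ∧
     (pvDfs (pvCoocc traces) activities visited component stack).2.Nodup) := by
  intro visited component stack
  induction visited, component, stack using pvDfs.induct (cooc := pvCoocc traces) (activities := activities) with
  | case1 visited component =>
    intro hv hcomp _ hfr hnd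
    rw [pvDfs]
    refine ⟨hv, hcomp, fun y hy => hy, by simp, ?_, hnd⟩
    intro y hy z hz
    rcases hfr y hy z hz with h | ⟨s, hs, _⟩
    · exact h
    · cases hs
  | case2 visited component node rest hcont ih =>
    intro hv hcomp hstack hfr hnd
    rw [pvDfs, if_pos hcont]
    have hvnode : node.val ∈ visited := (PySem.Set.contains_iff _ _).mp hcont
    obtain ⟨c1, c2, c3, c4, c5, c6⟩ := ih hv hcomp
      (fun s hs => hstack s (List.mem_cons_of_mem _ hs))
      (fun y hy z hz => by
        rcases hfr y hy z hz with h | ⟨s, hs, hsz⟩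
        · exact Or.inl h
        · rcases List.mem_cons.mp hs with rfl | hs
          · exact Or.inl (hsz ▸ hvnode)
          · exact Or.inr ⟨s, hs, hsz⟩) hnd
    refine ⟨c1, c2, c3, ?_, c5, c6⟩
    intro s hs
    rcases List.mem_cons.mp hs with rfl | hs
    · -- s = node : node ∈ visited ⊆ result
      have : s.val ∈ visited₀ ∨ s.val ∈ component := (hv _).mp hvnode
      rcases this with h | h
      · exact (c1 _).mpr (Or.inl h)
      · exact (c1 _).mpr (Or.inr (c3 _ h))
    · exact c4 s hs
  | case3 visited component node rest hncont visited' component' nbrs pushes ih =>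
    intro hv hcomp hstack hfr hnd
    rw [pvDfs, if_neg hncont]
    have hvnode : node.val ∉ visited := fun h => hncont ((PySem.Set.contains_iff _ _).mpr h)
    have hconn_node : pvConn traces activities a node.val := hstack node (by simp)
    have hmem_pushes : ∀ s : {x : String // x ∈ activities},
        s ∈ pushes ↔ s.val ∈ nbrs := by
      intro s
      constructor
      · intro hs
        obtain ⟨nb, hnb, heq⟩ := List.mem_pmap.mp hs
        rw [← heq]
        exact hnb
      · intro hs
        exact List.mem_pmap.mpr ⟨s.val, hs, rfl⟩
    have hmem_nbrs : ∀ z, z ∈ nbrs ↔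
        ((∃ t ∈ traces, node.val ∈ t ∧ z ∈ t) ∧ z ∈ activities ∧ z ∉ visited') := by
      intro z
      simp only [nbrs, List.mem_filter, Bool.and_eq_true, Bool.not_eq_true']
      rw [pvCoocc_mem]
      constructor
      · rintro ⟨h1, h2, h3⟩
        refine ⟨h1, (PySem.Set.mem_ofList _ _).mp ((PySem.Set.contains_iff _ _).mp h2), ?_⟩
        intro hz
        rw [(PySem.Set.contains_iff _ _).mpr hz] at h3
        cases h3
      · rintro ⟨h1, h2, h3⟩
        refine ⟨h1, (PySem.Set.contains_iff _ _).mpr ((PySem.Set.mem_ofList _ _).mpr h2), ?_⟩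
        cases hc : PySem.Set.contains visited' z
        · rfl
        · exact absurd ((PySem.Set.contains_iff _ _).mp hc) h3
    have hmem_v' : ∀ y, y ∈ visited' ↔ y ∈ visited ∨ y = node.val := fun y =>
      PySem.Set.mem_add _ _ _
    have hmem_c' : ∀ y, y ∈ component' ↔ y ∈ component ∨ y = node.val := fun y =>
      PySem.Set.mem_add _ _ _
    -- invariants for the recursive call
    have hv' : ∀ y, y ∈ visited' ↔ y ∈ visited₀ ∨ y ∈ component' := by
      intro y
      rw [hmem_v', hmem_c', hv]
      tauto
    have hcomp' : ∀ y ∈ component', pvConn traces activities a y := by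
      intro y hy
      rcases (hmem_c' y).mp hy with h | rfl
      · exact hcomp y h
      · exact hconn_node
    have hstack' : ∀ s ∈ pushes.reverse ++ rest, pvConn traces activities a s.val := by
      intro s hs
      rcases List.mem_append.mp hs with hs | hs
      · have := (hmem_pushes s).mp (List.mem_reverse.mp hs)
        obtain ⟨⟨t, ht, hnt, hst⟩, hsa, _⟩ := (hmem_nbrs _).mp this
        exact hconn_node.tail ⟨node.property, hsa, t, ht, hnt, hst⟩
      · exact hstack s (List.mem_cons_of_mem _ hs)
    have hfr' : ∀ y ∈ component', ∀ z, pvEdge traces activities y z →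
        z ∈ visited' ∨ ∃ s ∈ pushes.reverse ++ rest, s.val = z := by
      intro y hy z hz
      rcases (hmem_c' y).mp hy with h | rfl
      · rcases hfr y h z hz with h' | ⟨s, hs, hsz⟩
        · exact Or.inl ((hmem_v' z).mpr (Or.inl h'))
        · rcases List.mem_cons.mp hs with rfl | hs
          · exact Or.inl ((hmem_v' z).mpr (Or.inr hsz.symm))
          · exact Or.inr ⟨s, List.mem_append.mpr (Or.inr hs), hsz⟩
      · -- y = node
        obtain ⟨_, hza, t, ht, hyt, hzt⟩ := hz
        by_cases hzv : z ∈ visited'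
        · exact Or.inl hzv
        · have hznb : z ∈ nbrs := (hmem_nbrs z).mpr ⟨⟨t, ht, hyt, hzt⟩, hza, hzv⟩
          refine Or.inr ⟨⟨z, hza⟩, List.mem_append.mpr (Or.inl ?_), rfl⟩
          rw [List.mem_reverse]
          exact (hmem_pushes ⟨z, hza⟩).mpr hznb
    have hnd' : component'.Nodup := PySem.Set.nodup_add _ _ hnd
    obtain ⟨c1, c2, c3, c4, c5, c6⟩ := ih hv' hcomp' hstack' hfr' hnd'
    refine ⟨c1, c2, ?_, ?_, c5, c6⟩
    · intro y hy
      exact c3 y ((hmem_c' y).mpr (Or.inl hy))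
    · intro s hs
      rcases List.mem_cons.mp hs with rfl | hs
      · have : s.val ∈ component' := (hmem_c' _).mpr (Or.inr rfl)
        exact (c1 _).mpr (Or.inr (c3 _ this))
      · exact c4 s (List.mem_append.mpr (Or.inr hs))

theorem pvDfs_class (traces : List (List String)) (activities : List String)
    (visited₀ : PySem.Set String) (a : String) (ha : a ∈ activities)
    (hcl : ∀ x y, x ∈ visited₀ → pvConn traces activities x y → y ∈ visited₀)
    (ha0 : a ∉ visited₀) :
    (∀ y, y ∈ (pvDfs (pvCoocc traces) activities visited₀ [] [⟨a, ha⟩]).1 ↔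
        y ∈ visited₀ ∨ y ∈ (pvDfs (pvCoocc traces) activities visited₀ [] [⟨a, ha⟩]).2) ∧
    (pvDfs (pvCoocc traces) activities visited₀ [] [⟨a, ha⟩]).2.Nodup ∧
    (∀ y, y ∈ (pvDfs (pvCoocc traces) activities visited₀ [] [⟨a, ha⟩]).2 ↔
        pvConn traces activities a y) := by
  obtain ⟨c1, c2, c3, c4, c5, c6⟩ := pvDfs_invariant traces activities visited₀ a
    visited₀ [] [⟨a, ha⟩]
    (by simp) (by simp)
    (by intro s hs; rcases List.mem_cons.mp hs with rfl | hs
        · exact Relation.ReflTransGen.refl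
        · cases hs)
    (by simp) (by simp)
  refine ⟨c1, c6, ?_⟩
  have hain : a ∈ (pvDfs (pvCoocc traces) activities visited₀ [] [⟨a, ha⟩]).2 := by
    have := c4 ⟨a, ha⟩ (by simp)
    rcases (c1 a).mp this with h | h
    · exact absurd h ha0
    · exact h
  intro y
  constructor
  · exact c2 y
  · intro hconn
    induction hconn with
    | refl => exact hain
    | tail hxy e ih =>
      rename_i u w
      have hc := c5 u ih w e
      rcases (c1 w).mp hc with h | h
      · exfalso
        exact ha0 (hcl w a h (pvConn_symm (hxy.tail e)))
      · exact h

-- ===== block bundles and the outer loop =====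
def pvBlocksOK (traces : List (List String)) (activities : List String)
    (Bs : List (PySem.Set String)) : Prop :=
  (∀ b ∈ Bs, b ≠ []) ∧
  (∀ b ∈ Bs, b.Nodup) ∧
  (∀ b ∈ Bs, ∀ x ∈ b, x ∈ activities) ∧
  (∀ x ∈ activities, ∃ b ∈ Bs, x ∈ b) ∧
  (∀ b ∈ Bs, ∀ x ∈ b, ∀ y, (y ∈ b ↔ pvConn traces activities x y)) ∧
  Bs.Pairwise (fun b c => ∀ x ∈ b, x ∉ c) ∧
  Bs.Pairwise (fun b c => ∀ x ∈ b,
    (∀ y ∈ b, List.idxOf x activities ≤ List.idxOf y activities) →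
    ∀ z ∈ c, List.idxOf x activities < List.idxOf z activities)

theorem pvMinWit (f : String → Nat) :
    ∀ (l : List String), l ≠ [] → ∃ x ∈ l, ∀ y ∈ l, f x ≤ f y := by
  intro l
  induction l with
  | nil => intro h; exact absurd rfl h
  | cons a l ih =>
    intro _
    by_cases hl : l = []
    · subst hl; exact ⟨a, by simp, by simp⟩
    · obtain ⟨x, hx, hmin⟩ := ih hl
      by_cases hfa : f a ≤ f x
      · refine ⟨a, by simp, ?_⟩
        intro y hy
        rcases List.mem_cons.mp hy with rfl | hy
        · exact le_refl _
        · exact le_trans hfa (hmin y hy)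
      · refine ⟨x, List.mem_cons_of_mem _ hx, ?_⟩
        intro y hy
        rcases List.mem_cons.mp hy with rfl | hy
        · omega
        · exact hmin y hy

theorem pvIdxLtDone {done : List String} {rest : List String} {x a : String}
    (hx : x ∈ done ++ a :: rest)
    (hlt : List.idxOf x (done ++ a :: rest) < done.length) : x ∈ done := by
  have hlen : List.idxOf x (done ++ a :: rest) < (done ++ a :: rest).length := by
    simp only [List.length_append, List.length_cons]; omega
  have hget := List.getElem_idxOf hlen
  rw [List.getElem_append_left hlt] at hget
  exact hget ▸ List.getElem_mem hlt

theorem pvIdxSelf {done : List String} {rest : List String} {a : String} :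
    List.idxOf a (done ++ a :: rest) ≤ done.length := by
  rw [List.idxOf_append]
  by_cases h : a ∈ done
  · rw [if_pos h]
    exact le_of_lt (List.idxOf_lt_length_of_mem h)
  · rw [if_neg h]
    simp

theorem pvOuter (traces : List (List String)) (activities : List String)
    (Bs : List (PySem.Set String)) (hBs : pvBlocksOK traces activities Bs) :
    ∀ (l : List {x : String // x ∈ activities}) (done : List String) (m : Nat)
      (visited : PySem.Set String) (comps : List (List String)),
    activities = done ++ l.map Subtype.val →
    m ≤ Bs.length →
    (∀ y, y ∈ visited ↔ ∃ b ∈ Bs.take m, y ∈ b) →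
    (∀ x ∈ done, x ∈ visited) →
    ((l.foldl (fun (st : PySem.Set String × List (List String)) a =>
        if PySem.Set.contains st.1 a.val then st
        else
          ((pvDfs (pvCoocc traces) activities st.1 [] [a]).1,
           st.2 ++ [PySem.List.sorted (pvDfs (pvCoocc traces) activities st.1 [] [a]).2
                      (fun x => x) false]))
      (visited, comps)).2
      = comps ++ ((Bs.drop m).map (fun b => PySem.List.sorted b (fun x => x) false))) := by
  obtain ⟨P0, P1, P2, P3, P4, P6, P5⟩ := hBs
  intro l
  induction l with
  | nil =>
    intro done m visited comps hsplit hm hv hdone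
    simp only [List.foldl_nil]
    have hdrop : Bs.drop m = [] := by
      cases hd : Bs.drop m with
      | nil => rfl
      | cons c cs =>
        exfalso
        have hc : c ∈ Bs.drop m := hd ▸ List.mem_cons_self
        have hcBs : c ∈ Bs := List.drop_subset _ _ hc
        obtain ⟨x, hx⟩ := List.exists_mem_of_ne_nil c (P0 c hcBs)
        have hxact : x ∈ activities := P2 c hcBs x hx
        have hxdone : x ∈ done := by
          rw [hsplit] at hxact; simpa using hxact
        obtain ⟨b', hb', hxb'⟩ := (hv x).mp (hdone x hxdone)
        -- b' ∈ take m and c ∈ drop m are different positions; disjointness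
        obtain ⟨i, hi, hbeq⟩ := List.mem_iff_getElem.mp hb'
        obtain ⟨j, hj, hceq⟩ := List.mem_iff_getElem.mp hc
        rw [List.length_take] at hi
        rw [List.length_drop] at hj
        have hbg : Bs[i]'(by omega) = b' := by
          rw [← hbeq]; exact (List.getElem_take).symm
        have hcg : Bs[m + j]'(by omega) = c := by
          rw [← hceq]; exact (List.getElem_drop ..).symm
        have hij : i < m + j := by omega
        have := List.pairwise_iff_getElem.mp P6 i (m + j) (by omega) (by omega) hij
        rw [hbg, hcg] at this
        exact this x hxb' hx
    rw [hdrop]; simp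
  | cons a l ih =>
    intro done m visited comps hsplit hm hv hdone
    simp only [List.foldl_cons]
    by_cases hcont : PySem.Set.contains visited a.val = true
    · rw [if_pos hcont]
      have hav : a.val ∈ visited := (PySem.Set.contains_iff _ _).mp hcont
      exact ih (done ++ [a.val]) m visited comps (by simpa using hsplit) hm hv
        (by intro x hx
            rcases List.mem_append.mp hx with hx | hx
            · exact hdone x hx
            · simp only [List.mem_singleton] at hx; exact hx ▸ hav)
    · rw [if_neg hcont]
      have hav : a.val ∉ visited := fun h => hcont ((PySem.Set.contains_iff _ _).mpr h)
      -- find a's block: it is Bs[m]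
      obtain ⟨b, hb, hab⟩ := P3 a.val a.property
      obtain ⟨j, hj, hbj⟩ := List.mem_iff_getElem.mp hb
      have hsplit' : activities = done ++ a.val :: l.map Subtype.val := by simpa using hsplit
      have hjm : j = m := by
        rcases lt_trichotomy j m with hlt | heq | hgt
        · exfalso
          apply hav
          apply (hv a.val).mpr
          refine ⟨b, ?_, hab⟩
          rw [← hbj]
          apply List.mem_iff_getElem.mpr
          exact ⟨j, by rw [List.length_take]; omega, List.getElem_take⟩
        · exact heq
        · exfalso
          have hmlt : m < Bs.length := by omega
          obtain ⟨x, hx, hxmin⟩ := pvMinWit (fun y => List.idxOf y activities) _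
            (P0 (Bs[m]'hmlt) (List.getElem_mem hmlt))
          have hrel := List.pairwise_iff_getElem.mp P5 m j hmlt hj hgt
          rw [hbj] at hrel
          have hxa : List.idxOf x activities < List.idxOf a.val activities :=
            hrel x hx hxmin a.val hab
          have hale : List.idxOf a.val activities ≤ done.length := by
            have h2 : List.idxOf a.val (done ++ a.val :: l.map Subtype.val) ≤ done.length :=
              pvIdxSelf
            rw [← hsplit'] at h2
            exact h2
          have hxact : x ∈ activities := P2 _ (List.getElem_mem hmlt) x hx
          have hxdone : x ∈ done := by
            rw [hsplit'] at hxact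
            exact pvIdxLtDone hxact (by rw [← hsplit']; omega)
          obtain ⟨b', hb', hxb'⟩ := (hv x).mp (hdone x hxdone)
          obtain ⟨i, hi, hbeq⟩ := List.mem_iff_getElem.mp hb'
          rw [List.length_take] at hi
          have hbg : Bs[i]'(by omega) = b' := by
            rw [← hbeq]; exact (List.getElem_take).symm
          have := List.pairwise_iff_getElem.mp P6 i m (by omega) hmlt (by omega)
          rw [hbg] at this
          exact this x hxb' hx
      subst hjm
      -- closedness of visited and DFS
      have hclosed : ∀ x y, x ∈ visited → pvConn traces activities x y → y ∈ visited := by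
        intro x y hx hconn
        obtain ⟨b', hb', hxb'⟩ := (hv x).mp hx
        have hb'Bs : b' ∈ Bs := List.take_subset _ _ hb'
        have := (P4 b' hb'Bs x hxb' y).mpr hconn
        exact (hv y).mpr ⟨b', hb', this⟩
      obtain ⟨c1, cnd, ccl⟩ := pvDfs_class traces activities visited a.val a.property hclosed hav
      have hsubty : (⟨a.val, a.property⟩ : {x : String // x ∈ activities}) = a := rfl
      rw [hsubty] at c1 cnd ccl
      have hmemBm : ∀ y, y ∈ Bs[j]'hj ↔ pvConn traces activities a.val y := by
        intro y
        rw [hbj]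
        exact P4 b hb a.val (hbj ▸ hab) y
      have hperm : (pvDfs (pvCoocc traces) activities visited [] [a]).2.Perm (Bs[j]'hj) := by
        rw [List.perm_ext_iff_of_nodup cnd (P1 _ (List.getElem_mem hj))]
        intro y
        rw [ccl y, hmemBm y]
      have hsorted_eq : PySem.List.sorted (pvDfs (pvCoocc traces) activities visited [] [a]).2
          (fun x => x) false = PySem.List.sorted (Bs[j]'hj) (fun x => x) false :=
        PySem.List.sorted_eq_sorted_of_perm _ _ _ (fun _ _ h => h) hperm
      have hdropm : Bs.drop j = (Bs[j]'hj) :: Bs.drop (j+1) := List.drop_eq_getElem_cons hj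
      rw [ih (done ++ [a.val]) (j+1) _ _ (by simpa using hsplit) (by omega) ?_ ?_]
      · rw [hdropm, hsorted_eq]
        simp only [List.map_cons, List.append_assoc, List.singleton_append]
      · -- new visited characterization
        intro y
        rw [c1 y]
        have htake : Bs.take (j+1) = Bs.take j ++ [Bs[j]'hj] := by
          rw [← List.take_concat_get hj, List.concat_eq_append]
        rw [htake]
        constructor
        · rintro (h | h)
          · obtain ⟨b', hb', hyb'⟩ := (hv y).mp h
            exact ⟨b', List.mem_append.mpr (Or.inl hb'), hyb'⟩
          · exact ⟨Bs[j]'hj, List.mem_append.mpr (Or.inr (by simp)), (hmemBm y).mpr ((ccl y).mp h)⟩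
        · rintro ⟨b', hb', hyb'⟩
          rcases List.mem_append.mp hb' with h | h
          · exact Or.inl ((hv y).mpr ⟨b', h, hyb'⟩)
          · simp only [List.mem_singleton] at h
            subst h
            exact Or.inr ((ccl y).mpr ((hmemBm y).mp hyb'))
      · -- done ++ [a] all visited
        intro x hx
        rcases List.mem_append.mp hx with hx | hx
        · exact (c1 x).mpr (Or.inl (hdone x hx))
        · simp only [List.mem_singleton] at hx
          subst hx
          exact (c1 _).mpr (Or.inr ((ccl _).mpr Relation.ReflTransGen.refl))

-- ===== B side: seed blocks =====
def pvSeedNew (s : PySem.Set String) : List String → List (PySem.Set String)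
  | [] => []
  | a :: l => if PySem.Set.contains s a then pvSeedNew s l
              else [a] :: pvSeedNew (PySem.Set.add s a) l

theorem pvSeed_fold : ∀ (l : List String) (s : PySem.Set String) (bs : List (PySem.Set String)),
    (l.foldl (fun (st : PySem.Set String × List (PySem.Set String)) a =>
        if PySem.Set.contains st.1 a then st
        else (PySem.Set.add st.1 a, st.2 ++ [[a]])) (s, bs)).2
      = bs ++ pvSeedNew s l := by
  intro l
  induction l with
  | nil => intro s bs; simp [pvSeedNew]
  | cons a l ih =>
    intro s bs
    simp only [List.foldl_cons, pvSeedNew]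
    by_cases h : PySem.Set.contains s a = true
    · rw [if_pos h, if_pos h, ih]
    · rw [if_neg h, if_neg h, ih]
      simp

theorem pvContainsAdd (s : PySem.Set String) (a x : String) :
    (!(PySem.Set.contains (PySem.Set.add s a) x)) = ((!(PySem.Set.contains s x)) && (!(x == a))) := by
  rw [Bool.eq_iff_iff]
  have h1 : (PySem.Set.contains (PySem.Set.add s a) x = true) ↔ (x ∈ s ∨ x = a) := by
    rw [PySem.Set.contains_iff, PySem.Set.mem_add]
  have h2 : (PySem.Set.contains s x = true) ↔ x ∈ s := PySem.Set.contains_iff s x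
  simp only [Bool.not_eq_true', Bool.and_eq_true, beq_iff_eq, ← Bool.not_eq_true]
  tauto

theorem pvSeedNew_eq : ∀ (l : List String) (s : PySem.Set String),
    pvSeedNew s l = ((PySem.List.dedup l).filter
        (fun a => !(PySem.Set.contains s a))).map (fun a => ([a] : PySem.Set String)) := by
  intro l
  induction l with
  | nil => intro s; rfl
  | cons a l ih =>
    intro s
    have hd : PySem.List.dedup (a :: l) = a :: (PySem.List.dedup l).filter (fun y => !(y == a)) := by
      simp only [PySem.List.dedup_eq_ofList, PySem.Set.ofList_cons]
      rfl
    rw [hd]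
    simp only [pvSeedNew, List.filter_cons]
    by_cases h : PySem.Set.contains s a = true
    · rw [if_pos h, ih]
      have hfa : (!(PySem.Set.contains s a)) = false := by rw [h]; rfl
      rw [hfa]
      simp only [Bool.false_eq_true, if_neg (by simp : ¬False)]
      congr 1
      rw [List.filter_filter]
      apply List.filter_congr
      intro x _
      by_cases hxa : x = a
      · subst hxa
        rw [hfa]; rfl
      · have : (x == a) = false := by simp [hxa]
        rw [this]; simp
    · have hfa : (!(PySem.Set.contains s a)) = true := by
        cases hc : PySem.Set.contains s a
        · rfl
        · exact absurd hc h
      rw [if_neg h, ih, hfa, if_pos rfl]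
      simp only [List.map_cons]
      rw [List.filter_filter, List.filter_congr (fun x _ => pvContainsAdd s a x)]

theorem pvDedupIdx : ∀ (l : List String),
    (PySem.List.dedup l).Pairwise (fun x y => List.idxOf x l < List.idxOf y l) := by
  intro l
  induction l with
  | nil => simp [PySem.List.dedup]
  | cons a l ih =>
    have hd : PySem.List.dedup (a :: l) = a :: (PySem.List.dedup l).filter (fun y => !(y == a)) := by
      simp only [PySem.List.dedup_eq_ofList, PySem.Set.ofList_cons]
      rfl
    rw [hd]
    apply List.Pairwise.cons
    · intro y hy
      have hya : y ≠ a := by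
        have := (List.mem_filter.mp hy).2
        simpa using this
      rw [List.idxOf_cons_self, List.idxOf_cons_ne _ (Ne.symm hya)]
      omega
    · have hsub : ((PySem.List.dedup l).filter (fun y => !(y == a))).Pairwise
          (fun x y => List.idxOf x l < List.idxOf y l) :=
        List.Pairwise.sublist List.filter_sublist ih
      apply List.Pairwise.imp_of_mem ?_ hsub
      intro x y hx hy hxy
      have hxa : x ≠ a := by simpa using (List.mem_filter.mp hx).2
      have hya : y ≠ a := by simpa using (List.mem_filter.mp hy).2
      rw [List.idxOf_cons_ne _ (Ne.symm hxa), List.idxOf_cons_ne _ (Ne.symm hya)]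
      omega

theorem pvSeedBlocks (activities : List String) :
    (activities.foldl (fun (st : PySem.Set String × List (PySem.Set String)) a =>
        if PySem.Set.contains st.1 a then st
        else (PySem.Set.add st.1 a, st.2 ++ [[a]])) ([], [])).2
      = (PySem.List.dedup activities).map (fun a => ([a] : PySem.Set String)) := by
  rw [pvSeed_fold, pvSeedNew_eq]
  simp [PySem.Set.contains]

theorem pvSeedOK (traces : List (List String)) (activities : List String) :
    pvBlocksOK [] activities ((PySem.List.dedup activities).map (fun a => ([a] : PySem.Set String))) := by
  refine ⟨?_, ?_, ?_, ?_, ?_, ?_, ?_⟩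
  · intro b hb
    obtain ⟨x, _, rfl⟩ := List.mem_map.mp hb
    simp
  · intro b hb
    obtain ⟨x, _, rfl⟩ := List.mem_map.mp hb
    simp
  · intro b hb x hx
    obtain ⟨y, hy, rfl⟩ := List.mem_map.mp hb
    simp only [List.mem_singleton] at hx
    subst hx
    exact (PySem.List.mem_dedup _ _).mp hy
  · intro x hx
    exact ⟨[x], List.mem_map.mpr ⟨x, (PySem.List.mem_dedup _ _).mpr hx, rfl⟩, by simp⟩
  · intro b hb x hx y
    obtain ⟨z, _, rfl⟩ := List.mem_map.mp hb
    simp only [List.mem_singleton] at hx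
    subst hx
    rw [pvConn_nil]
    simp only [List.mem_singleton]
    constructor
    · intro h; exact h.symm
    · intro h; exact h.symm
  · rw [List.pairwise_map]
    apply List.Pairwise.imp_of_mem ?_ (PySem.List.nodup_dedup activities)
    intro x y _ _ hxy z hz hzy
    simp only [List.mem_singleton] at hz hzy
    subst hz
    exact hxy (hzy ▸ rfl)
  · rw [List.pairwise_map]
    apply List.Pairwise.imp_of_mem ?_ (pvDedupIdx activities)
    intro x y _ _ hxy
    intro z hz _ w hw
    simp only [List.mem_singleton] at hz hw
    subst hz; subst hw
    exact hxy

-- ===== B side: one trace step =====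
def pvMergeList (hit : PySem.Set String → Bool) (u : PySem.Set String) :
    Bool → List (PySem.Set String) → List (PySem.Set String)
  | _, [] => []
  | placed, b :: bs =>
      if hit b then
        (if placed then pvMergeList hit u true bs else u :: pvMergeList hit u true bs)
      else b :: pvMergeList hit u placed bs

theorem pvMergeList_true (hit : PySem.Set String → Bool) (u : PySem.Set String) :
    ∀ (bs : List (PySem.Set String)),
    pvMergeList hit u true bs = bs.filter (fun b => !(hit b)) := by
  intro bs
  induction bs with
  | nil => rfl
  | cons c cs ih =>
    simp only [pvMergeList, List.filter_cons]
    by_cases hc : hit c = true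
    · simp [hc, ih]
    · have hc' : hit c = false := by cases h : hit c; rfl; exact absurd h hc
      simp [hc', ih]

theorem pvMerge_fold (hit : PySem.Set String → Bool) (u : PySem.Set String) :
    ∀ (bs : List (PySem.Set String)) (acc : List (PySem.Set String)) (placed : Bool),
    (bs.foldl (fun (st : List (PySem.Set String) × Bool) b =>
        if hit b then (if st.2 then st else (st.1 ++ [u], true))
        else (st.1 ++ [b], st.2)) (acc, placed)).1
      = acc ++ pvMergeList hit u placed bs := by
  intro bs
  induction bs with
  | nil => intro acc placed; simp [pvMergeList]
  | cons b bs ih =>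
    intro acc placed
    simp only [List.foldl_cons, pvMergeList]
    by_cases hb : hit b = true
    · cases placed
      · simp [hb, ih]
      · simp [hb, ih]
    · simp [hb, ih]

theorem pvMergeList_nohit (hit : PySem.Set String → Bool) (u : PySem.Set String) :
    ∀ (bs : List (PySem.Set String)), (∀ b ∈ bs, hit b = false) →
    ∀ placed, pvMergeList hit u placed bs = bs := by
  intro bs
  induction bs with
  | nil => intro _ placed; rfl
  | cons b bs ih =>
    intro h placed
    have hb : hit b = false := h b (by simp)
    simp only [pvMergeList, hb]
    simp [ih (fun c hc => h c (List.mem_cons_of_mem _ hc)) placed]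

theorem pvMergeList_hit (hit : PySem.Set String → Bool) (u : PySem.Set String) :
    ∀ (bs : List (PySem.Set String)), (∃ b ∈ bs, hit b = true) →
    ∃ pre b0 post, bs = pre ++ b0 :: post ∧ (∀ b ∈ pre, hit b = false) ∧ hit b0 = true ∧
      pvMergeList hit u false bs = pre ++ u :: post.filter (fun b => !(hit b)) := by
  intro bs
  induction bs with
  | nil => intro h; simp at h
  | cons b bs ih =>
    intro h
    by_cases hb : hit b = true
    · refine ⟨[], b, bs, by simp, by simp, hb, ?_⟩
      simp only [pvMergeList, if_pos hb]
      simp only [List.nil_append]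
      rw [pvMergeList_true]
      simp
    · have hb' : hit b = false := by cases h2 : hit b; rfl; exact absurd h2 hb
      obtain ⟨c, hc, hhc⟩ := h
      rcases List.mem_cons.mp hc with rfl | hc2
      · exact absurd hhc hb
      · obtain ⟨pre, b0, post, heq, hpre, hb0, hml⟩ := ih ⟨c, hc2, hhc⟩
        refine ⟨b :: pre, b0, post, by rw [heq]; rfl, ?_, hb0, ?_⟩
        · intro d hd
          rcases List.mem_cons.mp hd with rfl | hd
          · exact hb'
          · exact hpre d hd
        · simp only [pvMergeList, if_neg hb]
          rw [hml]
          rfl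

theorem pvUnion_fold (hit : PySem.Set String → Bool) :
    ∀ (bs : List (PySem.Set String)) (u0 : PySem.Set String) (y : String),
    (y ∈ bs.foldl (fun (u : PySem.Set String) b =>
        if hit b then PySem.Set.update u b else u) u0
      ↔ y ∈ u0 ∨ ∃ b ∈ bs, hit b = true ∧ y ∈ b) := by
  intro bs
  induction bs with
  | nil => intro u0 y; simp
  | cons b bs ih =>
    intro u0 y
    simp only [List.foldl_cons]
    by_cases hb : hit b = true
    · rw [if_pos hb, ih]
      rw [PySem.Set.mem_update]
      constructor
      · rintro ((h | h) | ⟨c, hc, hhc, hyc⟩)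
        · exact Or.inl h
        · exact Or.inr ⟨b, by simp, hb, h⟩
        · exact Or.inr ⟨c, List.mem_cons_of_mem _ hc, hhc, hyc⟩
      · rintro (h | ⟨c, hc, hhc, hyc⟩)
        · exact Or.inl (Or.inl h)
        · rcases List.mem_cons.mp hc with rfl | hc
          · exact Or.inl (Or.inr hyc)
          · exact Or.inr ⟨c, hc, hhc, hyc⟩
    · rw [if_neg hb, ih]
      constructor
      · rintro (h | ⟨c, hc, hhc, hyc⟩)
        · exact Or.inl h
        · exact Or.inr ⟨c, List.mem_cons_of_mem _ hc, hhc, hyc⟩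
      · rintro (h | ⟨c, hc, hhc, hyc⟩)
        · exact Or.inl h
        · rcases List.mem_cons.mp hc with rfl | hc
          · exact absurd hhc hb
          · exact Or.inr ⟨c, hc, hhc, hyc⟩

theorem pvUnion_nodup (hit : PySem.Set String → Bool) :
    ∀ (bs : List (PySem.Set String)) (u0 : PySem.Set String), u0.Nodup →
    (bs.foldl (fun (u : PySem.Set String) b =>
        if hit b then PySem.Set.update u b else u) u0).Nodup := by
  intro bs
  induction bs with
  | nil => intro u0 h; exact h
  | cons b bs ih =>
    intro u0 h
    simp only [List.foldl_cons]
    by_cases hb : hit b = true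
    · rw [if_pos hb]
      exact ih _ (PySem.Set.nodup_update _ _ h)
    · rw [if_neg hb]
      exact ih _ h

def pvHit (activities tr : List String) (b : PySem.Set String) : Bool :=
  !(PySem.Set.isdisjoint b (PySem.Set.inter (PySem.Set.ofList tr) (PySem.Set.ofList activities)))

theorem pvHit_iff (activities tr : List String) (b : PySem.Set String) :
    pvHit activities tr b = true ↔ ∃ x ∈ b, x ∈ tr ∧ x ∈ activities := by
  unfold pvHit
  rw [Bool.not_eq_eq_eq_not, Bool.not_true, ← Bool.not_eq_true]
  rw [PySem.Set.isdisjoint_iff]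
  push_neg
  constructor
  · rintro ⟨x, hxb, hxt⟩
    have := (PySem.Set.mem_inter _ _ _).mp hxt
    exact ⟨x, hxb, (PySem.Set.mem_ofList _ _).mp this.1, (PySem.Set.mem_ofList _ _).mp this.2⟩
  · rintro ⟨x, hxb, h1, h2⟩
    exact ⟨x, hxb, (PySem.Set.mem_inter _ _ _).mpr
      ⟨(PySem.Set.mem_ofList _ _).mpr h1, (PySem.Set.mem_ofList _ _).mpr h2⟩⟩

theorem pvDisjSymm : Symmetric (fun (b c : PySem.Set String) => ∀ x ∈ b, x ∉ c) := by
  intro b c h x hxc hxb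
  exact h x hxb hxc

theorem pvStepOK (activities : List String) (ts : List (List String)) (tr : List String)
    (blocks : List (PySem.Set String)) (hOK : pvBlocksOK ts activities blocks) :
    pvBlocksOK (ts ++ [tr]) activities
      (pvMergeList (pvHit activities tr)
        (blocks.foldl (fun (u : PySem.Set String) b =>
          if pvHit activities tr b then PySem.Set.update u b else u) [])
        false blocks) := by
  obtain ⟨P0, P1, P2, P3, P4, P6, P5⟩ := hOK
  set hit := pvHit activities tr with hhitdef
  set u := blocks.foldl (fun (u : PySem.Set String) b =>
      if hit b then PySem.Set.update u b else u) [] with hudef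
  have hhit : ∀ b, hit b = true ↔ ∃ x ∈ b, x ∈ tr ∧ x ∈ activities := fun b =>
    pvHit_iff activities tr b
  have hu_mem : ∀ y, y ∈ u ↔ ∃ b ∈ blocks, hit b = true ∧ y ∈ b := by
    intro y
    rw [hudef, pvUnion_fold]
    simp
  have hu_nodup : u.Nodup := pvUnion_nodup hit blocks [] (by simp)
  by_cases hany : ∃ b ∈ blocks, hit b = true
  · -- some block is touched by the trace
    obtain ⟨pre, b0, post, heq, hpre, hb0, hml⟩ := pvMergeList_hit hit u blocks hany
    rw [hml]
    have hb0blocks : b0 ∈ blocks := by rw [heq]; simp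
    have hpreblocks : ∀ b ∈ pre, b ∈ blocks := by
      intro b hb; rw [heq]; exact List.mem_append.mpr (Or.inl hb)
    have hpostblocks : ∀ b ∈ post, b ∈ blocks := by
      intro b hb; rw [heq]
      exact List.mem_append.mpr (Or.inr (List.mem_cons_of_mem _ hb))
    have hfiltpost : ∀ b ∈ post.filter (fun b => !(hit b)), b ∈ post ∧ hit b = false := by
      intro b hb
      have := List.mem_filter.mp hb
      exact ⟨this.1, by simpa using this.2⟩
    -- decompose old pairwise facts
    have hP6 := P6; have hP5 := P5
    rw [heq] at hP6 hP5
    obtain ⟨h6pre, h6rest, h6cross⟩ := List.pairwise_append.mp hP6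
    obtain ⟨h6b0, h6post⟩ := List.pairwise_cons.mp h6rest
    obtain ⟨h5pre, h5rest, h5cross⟩ := List.pairwise_append.mp hP5
    obtain ⟨h5b0, h5post⟩ := List.pairwise_cons.mp h5rest
    -- u facts
    have hsubu : ∀ b ∈ blocks, hit b = true → ∀ x ∈ b, x ∈ u := by
      intro b hb hh x hx
      exact (hu_mem x).mpr ⟨b, hb, hh, hx⟩
    -- P2 for u
    have hP2u : ∀ x ∈ u, x ∈ activities := by
      intro x hx
      obtain ⟨b, hb, _, hxb⟩ := (hu_mem x).mp hx
      exact P2 b hb x hxb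
    -- a hit block shares no element with an unhit block (positional, via values)
    have hdisj_hit_unhit : ∀ c ∈ post, hit c = false → ∀ x ∈ u, x ∉ c := by
      intro c hc hcf x hx hxc
      obtain ⟨bh, hbh, hbhhit, hxbh⟩ := (hu_mem x).mp hx
      rw [heq] at hbh
      rcases List.mem_append.mp hbh with hbhpre | hbhrest
      · exact (hhit bh).mp hbhhit |>.elim (fun w hw => by
          have := hpre bh hbhpre
          rw [this] at hbhhit; cases hbhhit)
      · rcases List.mem_cons.mp hbhrest with rfl | hbhpost
        · exact h6b0 c hc x hxbh hxc
        · by_cases hbc : bh = c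
          · subst hbc; rw [hbhhit] at hcf; cases hcf
          · exact List.Pairwise.forall pvDisjSymm h6post hbhpost hc hbc x hxbh hxc
    refine ⟨?_, ?_, ?_, ?_, ?_, ?_, ?_⟩
    · -- P0: nonempty
      intro b hb
      rcases List.mem_append.mp hb with hbpre | hbrest
      · exact P0 b (hpreblocks b hbpre)
      · rcases List.mem_cons.mp hbrest with rfl | hbf
        · obtain ⟨x, hx⟩ := List.exists_mem_of_ne_nil b0 (P0 b0 hb0blocks)
          exact List.ne_nil_of_mem (hsubu b0 hb0blocks hb0 x hx)
        · exact P0 _ (hpostblocks _ (hfiltpost _ hbf).1)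
    · -- P1: nodup
      intro b hb
      rcases List.mem_append.mp hb with hbpre | hbrest
      · exact P1 b (hpreblocks b hbpre)
      · rcases List.mem_cons.mp hbrest with rfl | hbf
        · exact hu_nodup
        · exact P1 _ (hpostblocks _ (hfiltpost _ hbf).1)
    · -- P2: members in activities
      intro b hb
      rcases List.mem_append.mp hb with hbpre | hbrest
      · exact P2 b (hpreblocks b hbpre)
      · rcases List.mem_cons.mp hbrest with rfl | hbf
        · exact hP2u
        · exact P2 _ (hpostblocks _ (hfiltpost _ hbf).1)
    · -- P3: coverage
      intro x hx
      obtain ⟨b, hb, hxb⟩ := P3 x hx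
      by_cases hbh : hit b = true
      · exact ⟨u, by simp, hsubu b hb hbh x hxb⟩
      · have hbf : hit b = false := by cases h : hit b; rfl; exact absurd h hbh
        rw [heq] at hb
        rcases List.mem_append.mp hb with hbpre | hbrest
        · exact ⟨b, List.mem_append.mpr (Or.inl hbpre), hxb⟩
        · rcases List.mem_cons.mp hbrest with rfl | hbpost
          · rw [hb0] at hbf; cases hbf
          · refine ⟨b, List.mem_append.mpr (Or.inr (List.mem_cons_of_mem _ ?_)), hxb⟩
            exact List.mem_filter.mpr ⟨hbpost, by simp [hbf]⟩
    · -- P4: classes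
      intro b hb x hx y
      have hunhit : b ∈ blocks → hit b = false → (y ∈ b ↔ pvConn (ts ++ [tr]) activities x y) := by
        intro hbb hbf
        constructor
        · intro hy
          exact pvConn_mono_snoc ((P4 b hbb x hx y).mp hy)
        · intro hconn
          rcases pvConn_snoc.mp hconn with h | ⟨u', v', h1, hu'a, hu't, hv'a, hv't, h2⟩
          · exact (P4 b hbb x hx y).mpr h
          · exfalso
            have hu'b : u' ∈ b := (P4 b hbb x hx u').mpr h1
            have : hit b = true := (hhit b).mpr ⟨u', hu'b, hu't, hu'a⟩
            rw [hbf] at this; cases this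
      rcases List.mem_append.mp hb with hbpre | hbrest
      · have hbf : hit b = false := hpre b hbpre
        exact hunhit (hpreblocks b hbpre) hbf
      · rcases List.mem_cons.mp hbrest with rfl | hbf
        · -- b = u
          obtain ⟨bh, hbh, hbhhit, hxbh⟩ := (hu_mem x).mp hx
          constructor
          · intro hy
            obtain ⟨bc, hbc, hbchit, hybc⟩ := (hu_mem y).mp hy
            obtain ⟨wh, hwhb, hwht, hwha⟩ := (hhit bh).mp hbhhit
            obtain ⟨wc, hwcb, hwct, hwca⟩ := (hhit bc).mp hbchit
            have h1 : pvConn ts activities x wh := (P4 bh hbh x hxbh wh).mp hwhb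
            have h2 : pvConn ts activities wc y := (P4 bc hbc wc hwcb y).mp hybc
            have he : pvEdge (ts ++ [tr]) activities wh wc :=
              ⟨hwha, hwca, tr, List.mem_append.mpr (Or.inr (by simp)), hwht, hwct⟩
            exact ((pvConn_mono_snoc h1).tail he).trans (pvConn_mono_snoc h2)
          · intro hconn
            rcases pvConn_snoc.mp hconn with h | ⟨u', v', h1, hu'a, hu't, hv'a, hv't, h2⟩
            · have : y ∈ bh := (P4 bh hbh x hxbh y).mpr h
              exact hsubu bh hbh hbhhit y this
            · obtain ⟨bv, hbv, hv'bv⟩ := P3 v' hv'a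
              have hbvhit : hit bv = true := (hhit bv).mpr ⟨v', hv'bv, hv't, hv'a⟩
              have : y ∈ bv := (P4 bv hbv v' hv'bv y).mpr h2
              exact hsubu bv hbv hbvhit y this
        · obtain ⟨hbpost, hbf⟩ := hfiltpost _ hbf
          exact hunhit (hpostblocks _ hbpost) hbf
    · -- P6: pairwise disjoint
      apply List.pairwise_append.mpr
      refine ⟨h6pre, ?_, ?_⟩
      · apply List.pairwise_cons.mpr
        refine ⟨?_, List.Pairwise.sublist List.filter_sublist h6post⟩
        intro c hc x hxu
        obtain ⟨hcpost, hcf⟩ := hfiltpost _ hc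
        exact hdisj_hit_unhit c hcpost hcf x hxu
      · intro p hp c hc
        rcases List.mem_cons.mp hc with rfl | hcf
        · -- c = u
          intro x hxp hxu
          obtain ⟨bh, hbh, hbhhit, hxbh⟩ := (hu_mem x).mp hxu
          rw [heq] at hbh
          rcases List.mem_append.mp hbh with hbhpre | hbhrest
          · rw [hpre bh hbhpre] at hbhhit; cases hbhhit
          · exact h6cross p hp bh hbhrest x hxp hxbh
        · exact h6cross p hp c (List.mem_cons_of_mem _ (hfiltpost _ hcf).1)
    · -- P5: ordering
      apply List.pairwise_append.mpr
      refine ⟨h5pre, ?_, ?_⟩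
      · apply List.pairwise_cons.mpr
        refine ⟨?_, List.Pairwise.sublist List.filter_sublist h5post⟩
        intro c hc x hxu hxmin z hzc
        obtain ⟨hcpost, _⟩ := hfiltpost _ hc
        -- x is the min of u; the min witness of b0 dominates c
        obtain ⟨x0, hx0b0, hx0min⟩ := pvMinWit (fun y => List.idxOf y activities) b0 (P0 b0 hb0blocks)
        have hx0u : x0 ∈ u := hsubu b0 hb0blocks hb0 x0 hx0b0
        have hle : List.idxOf x activities ≤ List.idxOf x0 activities := hxmin x0 hx0u
        have hlt : List.idxOf x0 activities < List.idxOf z activities :=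
          h5b0 c hcpost x0 hx0b0 hx0min z hzc
        omega
      · intro p hp c hc
        rcases List.mem_cons.mp hc with rfl | hcf
        · intro x hxp hxmin z hzu
          obtain ⟨bh, hbh, hbhhit, hzbh⟩ := (hu_mem z).mp hzu
          rw [heq] at hbh
          rcases List.mem_append.mp hbh with hbhpre | hbhrest
          · rw [hpre bh hbhpre] at hbhhit; cases hbhhit
          · exact h5cross p hp bh hbhrest x hxp hxmin z hzbh
        · exact h5cross p hp c (List.mem_cons_of_mem _ (hfiltpost _ hcf).1)
  · -- no block touched: everything unchanged
    have hno : ∀ b ∈ blocks, hit b = false := by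
      intro b hb
      cases h : hit b
      · rfl
      · exact absurd ⟨b, hb, h⟩ hany
    rw [pvMergeList_nohit hit u blocks hno false]
    have hconn : ∀ x y, (∃ b ∈ blocks, x ∈ b) →
        (pvConn (ts ++ [tr]) activities x y ↔ pvConn ts activities x y) := by
      intro x y ⟨b, hb, hxb⟩
      constructor
      · intro h
        rcases pvConn_snoc.mp h with h | ⟨u', v', h1, hu'a, hu't, hv'a, hv't, h2⟩
        · exact h
        · exfalso
          have hu'b : u' ∈ b := (P4 b hb x hxb u').mpr h1
          have : hit b = true := (hhit b).mpr ⟨u', hu'b, hu't, hu'a⟩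
          rw [hno b hb] at this; cases this
      · exact pvConn_mono_snoc
    refine ⟨P0, P1, P2, P3, ?_, P6, P5⟩
    intro b hb x hx y
    rw [P4 b hb x hx y, ← hconn x y ⟨b, hb, hx⟩]

theorem pvFoldOK (activities : List String) :
    ∀ (ts2 ts1 : List (List String)) (blocks : List (PySem.Set String)),
    pvBlocksOK ts1 activities blocks →
    pvBlocksOK (ts1 ++ ts2) activities
      (ts2.foldl (fun (blocks : List (PySem.Set String)) trace =>
        (blocks.foldl (fun (st : List (PySem.Set String) × Bool) b =>
          if pvHit activities trace b then
            (if st.2 then st else (st.1 ++ [blocks.foldl (fun (u : PySem.Set String) c =>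
              if pvHit activities trace c then PySem.Set.update u c else u) []], true))
          else (st.1 ++ [b], st.2)) ([], false)).1) blocks) := by
  intro ts2
  induction ts2 with
  | nil => intro ts1 blocks h; simpa using h
  | cons tr ts2 ih =>
    intro ts1 blocks h
    simp only [List.foldl_cons]
    have hstep := pvStepOK activities ts1 tr blocks h
    have hre : (blocks.foldl (fun (st : List (PySem.Set String) × Bool) b =>
          if pvHit activities tr b then
            (if st.2 then st else (st.1 ++ [blocks.foldl (fun (u : PySem.Set String) c =>
              if pvHit activities tr c then PySem.Set.update u c else u) []], true))
          else (st.1 ++ [b], st.2)) ([], false)).1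
        = pvMergeList (pvHit activities tr)
            (blocks.foldl (fun (u : PySem.Set String) c =>
              if pvHit activities tr c then PySem.Set.update u c else u) [])
            false blocks := by
      rw [pvMerge_fold]
      simp
    rw [hre]
    have := ih (ts1 ++ [tr]) _ hstep
    simpa [List.append_assoc] using this

theorem pvMainEq (traces : List (List String)) (activities : List String) :
    find_xor_cut_py traces activities = find_xor_cut_py_alt traces activities := by
  have hseed := pvSeedBlocks activities
  have hOK : pvBlocksOK traces activities
      (traces.foldl (fun (blocks : List (PySem.Set String)) trace =>
        (blocks.foldl (fun (st : List (PySem.Set String) × Bool) b =>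
          if pvHit activities trace b then
            (if st.2 then st else (st.1 ++ [blocks.foldl (fun (u : PySem.Set String) c =>
              if pvHit activities trace c then PySem.Set.update u c else u) []], true))
          else (st.1 ++ [b], st.2)) ([], false)).1)
        ((activities.foldl (fun (st : PySem.Set String × List (PySem.Set String)) a =>
            if PySem.Set.contains st.1 a then st
            else (PySem.Set.add st.1 a, st.2 ++ [[a]])) ([], [])).2)) := by
    rw [hseed]
    have := pvFoldOK activities traces []
      ((PySem.List.dedup activities).map (fun a => ([a] : PySem.Set String)))
      (pvSeedOK traces activities)
    simpa using this
  have houter := pvOuter traces activities _ hOK activities.attach [] 0 [] []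
    (by simp) (Nat.zero_le _) (by simp) (by simp)
  have hA : find_xor_cut_py traces activities =
      (if ((activities.attach.foldl
          (fun (st : PySem.Set String × List (List String)) a =>
            if PySem.Set.contains st.1 a.val then st
            else
              ((pvDfs (pvCoocc traces) activities st.1 [] [a]).1,
               st.2 ++ [PySem.List.sorted (pvDfs (pvCoocc traces) activities st.1 [] [a]).2
                          (fun x => x) false]))
          ([], [])).2).length > 1
       then some ((activities.attach.foldl
          (fun (st : PySem.Set String × List (List String)) a =>
            if PySem.Set.contains st.1 a.val then st
            else
              ((pvDfs (pvCoocc traces) activities st.1 [] [a]).1,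
               st.2 ++ [PySem.List.sorted (pvDfs (pvCoocc traces) activities st.1 [] [a]).2
                          (fun x => x) false]))
          ([], [])).2)
       else none) := rfl
  rw [hA]
  rw [houter]
  simp only [List.nil_append, List.drop_zero]
  rfl

-- ===== VERDICT (by name: the statement is the Claim_ definition above) =====
theorem find_xor_cut_py_spec : Claim_equal_find_xor_cut_py := by
  intro traces activities _
  show find_xor_cut_py traces activities = find_xor_cut_py_alt traces activities
  exact pvMainEq traces activities
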